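-- pv_equiv track=rewrite | github.com/Artyom1363/SearchBot | record.py | get_lower_id
-- ===== SOURCE A (Python) =====
-- def get_lower_id(elem, lst):
--     for i in range(len(lst) - 1,-1,-1):
--         if lst[i] == elem:
--             if i - 1 >= 0:
--                 return lst[i - 1]
--
--             else:
--                 return None
--     return None
-- ===== SOURCE B (Python) =====
-- def get_lower_id(elem, lst):
--     # Pairwise view: zip each element with its successor; the answer is the
--     # predecessor of the LAST successor equal to elem (no indices, no lookup).
--     result = None
--     for prev, cur in zip(lst, lst[1:]):
--         if cur == elem:
--             result = prev
--     return result
-- ===== Notes on version B (the rewrite author's own statement) =====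
-- stated objective: alternative
-- what changed: B reformulates the task on adjacent pairs: it zips the list with its own tail and keeps the first component of the last pair whose second component equals elem, eliminating all index arithmetic and the post-hoc lst[i-1] lookup of A's reverse index scan.
import Mathlib
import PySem

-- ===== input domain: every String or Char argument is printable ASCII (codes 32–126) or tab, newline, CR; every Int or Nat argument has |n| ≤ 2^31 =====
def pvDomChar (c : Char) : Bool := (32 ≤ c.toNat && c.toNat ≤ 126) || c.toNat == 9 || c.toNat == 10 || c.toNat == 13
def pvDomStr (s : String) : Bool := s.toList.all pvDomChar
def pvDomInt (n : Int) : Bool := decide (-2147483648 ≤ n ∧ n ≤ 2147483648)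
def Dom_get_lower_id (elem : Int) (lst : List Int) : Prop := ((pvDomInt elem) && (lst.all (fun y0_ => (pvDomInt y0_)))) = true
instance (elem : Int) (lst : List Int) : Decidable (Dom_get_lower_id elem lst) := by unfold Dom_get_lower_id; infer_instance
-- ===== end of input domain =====

-- B reformulates the task on adjacent pairs (zip the list with its tail, keep the
-- predecessor of the last successor equal to elem), removing A's index arithmetic
-- and post-hoc lst[i-1] lookup (alternative decomposition, same O(n) cost).

-- ===== PORT A =====
-- A's loop 'for i in range(len(lst)-1,-1,-1)' as the obvious structural recursion on the
-- descending index (fuel k+1 means the current index is k).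
def pvALoop (elem : Int) (lst : List Int) : Nat → Option Int
  | 0 => none
  | k + 1 =>
    if PySem.List.pyGet? lst (k : Int) = some elem then
      if (k : Int) - 1 ≥ 0 then PySem.List.pyGet? lst ((k : Int) - 1) else none
    else pvALoop elem lst k

def get_lower_id (elem : Int) (lst : List Int) : Option Int :=
  pvALoop elem lst lst.length

-- ===== PORT B =====
-- 'for prev, cur in zip(lst, lst[1:]): if cur == elem: result = prev' as a foldl
-- over the zipped pair list; lst[1:] is PySem.List.slice lst (some 1) none.
def get_lower_id_alt (elem : Int) (lst : List Int) : Option Int :=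
  (lst.zip (PySem.List.slice lst (some 1) none)).foldl
    (fun result p => if p.2 = elem then some p.1 else result) (none : Option Int)

-- ===== PRECONDITION & SPEC =====
def Spec_get_lower_id (elem : Int) (lst : List Int) (out : Option Int) : Prop := out = get_lower_id_alt elem lst
instance (elem : Int) (lst : List Int) (out : Option Int) : Decidable (Spec_get_lower_id elem lst out) := by unfold Spec_get_lower_id; infer_instance

-- ===== CLAIM (what is proved, stated in full; the proofs are below) =====
def Claim_equal_get_lower_id : Prop := ∀ (elem : Int) (lst : List Int), Dom_get_lower_id elem lst → Spec_get_lower_id elem lst (get_lower_id elem lst)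

-- ===== LEMMAS AND PROOFS =====

-- A's loop ignores a final appended element while the index stays below lst.length
theorem pvALoop_append (elem x : Int) (lst : List Int) (k : Nat) (hk : k ≤ lst.length) :
    pvALoop elem (lst ++ [x]) k = pvALoop elem lst k := by
  induction k with
  | zero => rfl
  | succ k ih =>
    have hk' : k < lst.length := by omega
    have hget : PySem.List.pyGet? (lst ++ [x]) (k : Int) = PySem.List.pyGet? lst (k : Int) := by
      simp [PySem.List.pyGet?_natCast, List.getElem?_append_left hk']
    rcases Nat.eq_zero_or_pos k with h0 | h0
    · have hc : ¬ ((k : Int) - 1 ≥ 0) := by omega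
      simp only [pvALoop, hget, if_neg hc, ih (by omega)]
    · have hget' : PySem.List.pyGet? (lst ++ [x]) ((k : Int) - 1) = PySem.List.pyGet? lst ((k : Int) - 1) := by
        have heq : ((k : Int) - 1) = ((k - 1 : Nat) : Int) := by omega
        have hb : k - 1 < lst.length := by omega
        rw [heq, PySem.List.pyGet?_natCast, PySem.List.pyGet?_natCast, List.getElem?_append_left hb]
      simp only [pvALoop, hget, hget', ih (by omega)]

-- the adjacent-pair list of lst ++ [x] is that of lst plus one final pair (getLast, x)
theorem pairs_append (x : Int) (lst : List Int) (h : lst ≠ []) :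
    (lst ++ [x]).zip (lst ++ [x]).tail =
      lst.zip lst.tail ++ [(lst.getLast h, x)] := by
  induction lst with
  | nil => exact absurd rfl h
  | cons a t ih =>
    cases t with
    | nil => rfl
    | cons b t' =>
      have := ih (by simp)
      simpa [List.getLast] using this

theorem get_lower_id_eq_alt (elem : Int) (lst : List Int) :
    get_lower_id elem lst = get_lower_id_alt elem lst := by
  induction lst using List.reverseRecOn with
  | nil => rfl
  | append_singleton lst x ih =>
    show pvALoop elem (lst ++ [x]) (lst ++ [x]).length = _
    unfold get_lower_id_alt
    rw [PySem.List.slice_from_one]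
    cases lst with
    | nil =>
      show pvALoop elem [x] 1 = _
      by_cases hx : x = elem <;>
        simp [pvALoop, PySem.List.pyGet?, PySem.List.pyIdx?, hx]
    | cons a t =>
      have hne : (a :: t) ≠ ([] : List Int) := by simp
      rw [pairs_append x (a :: t) hne, List.foldl_append]
      have hA : PySem.List.pyGet? ((a :: t) ++ [x]) ((a :: t).length : Int) = some x := by
        rw [PySem.List.pyGet?_natCast]
        simp
      rw [List.length_append]
      show (if PySem.List.pyGet? ((a :: t) ++ [x]) (((a :: t).length : Nat) : Int) = some elem then
          (if (((a :: t).length : Nat) : Int) - 1 ≥ 0 then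
            PySem.List.pyGet? ((a :: t) ++ [x]) ((((a :: t).length : Nat) : Int) - 1) else none)
        else pvALoop elem ((a :: t) ++ [x]) (a :: t).length) = _
      by_cases hx : x = elem
      · -- last element matches: A returns lst[len-1] = getLast; B's final fold step keeps it too
        have hlast : PySem.List.pyGet? ((a :: t) ++ [x]) (((a :: t).length : Int) - 1) =
            some ((a :: t).getLast hne) := by
          have heq : (((a :: t).length : Int) - 1) = ((t.length : Nat) : Int) := by simp
          rw [heq, PySem.List.pyGet?_natCast, List.getElem?_append_left (by simp)]
          simp only [List.getLast_eq_getElem, List.length_cons, Nat.add_sub_cancel]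
          exact List.getElem?_eq_getElem (by simp)
        have hge : (((a :: t).length : Nat) : Int) - 1 ≥ 0 := by simp
        rw [hA, if_pos (congrArg some hx), if_pos hge, hlast]
        simp [hx]
      · have hne' : ¬ (some x = some elem) := by simp [hx]
        rw [hA, if_neg hne']
        rw [pvALoop_append elem x (a :: t) (a :: t).length le_rfl]
        rw [show pvALoop elem (a :: t) (a :: t).length = get_lower_id elem (a :: t) from rfl, ih]
        unfold get_lower_id_alt
        rw [PySem.List.slice_from_one]
        simp [hx]

-- ===== VERDICT (by name: the statement is the Claim_ definition above) =====
theorem get_lower_id_spec : Claim_equal_get_lower_id := by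
  intro elem lst _
  exact get_lower_id_eq_alt elem lst
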